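-- pv_equiv track=rewrite | github.com/MrBrantCode/unitest_baseline | mut_generate/mist_train_cf/cf_89168/solution.py | zigzagSum
-- ===== SOURCE A (Python) =====
-- def zigzagSum(arr):
--     """
--     This function calculates the sum of all elements in a 2D array accessed in a zigzag pattern.
--
--     Parameters:
--     arr (list): A 2D array with m rows and n columns.
--
--     Returns:
--     int: The sum of all elements accessed in the zigzag pattern.
--     """
--     # Initialize variables
--     row = 0
--     col = 0
--     sum_elements = 0
--
--     # Get the total number of rows and columns in the array
--     num_rows = len(arr)
--     num_cols = len(arr[0])
--
--     # Loop through each element in the array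
--     for _ in range(num_rows * num_cols):
--         # Access the current element and add it to the sum
--         sum_elements += arr[row][col]
--
--         # Check if the current row is even
--         if row % 2 == 0:
--             # Check if we are at the last column
--             if col == num_cols - 1:
--                 # Move diagonally down-left
--                 row += 1
--             else:
--                 # Move right
--                 col += 1
--         else:
--             # Check if we are at the first column
--             if col == 0:
--                 # Move diagonally down-left
--                 row += 1
--             else:
--                 # Move left
--                 col -= 1
--
--     return sum_elements
-- ===== SOURCE B (Python) =====
-- def zigzagSum(arr):
--     num_rows = len(arr)
--     num_cols = len(arr[0])
--     total = 0
--     for r in range(num_rows):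
--         for c in range(num_cols):
--             total += arr[r][c]
--     return total
-- ===== Notes on version B (the rewrite author's own statement) =====
-- stated objective: simpler
-- what changed: Replaced the single flat loop with zigzag row/col/direction state machine by two plain nested index loops over rows and the first num_cols columns, dropping all position and direction-switching logic (order of visits does not affect the sum).
import Mathlib
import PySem

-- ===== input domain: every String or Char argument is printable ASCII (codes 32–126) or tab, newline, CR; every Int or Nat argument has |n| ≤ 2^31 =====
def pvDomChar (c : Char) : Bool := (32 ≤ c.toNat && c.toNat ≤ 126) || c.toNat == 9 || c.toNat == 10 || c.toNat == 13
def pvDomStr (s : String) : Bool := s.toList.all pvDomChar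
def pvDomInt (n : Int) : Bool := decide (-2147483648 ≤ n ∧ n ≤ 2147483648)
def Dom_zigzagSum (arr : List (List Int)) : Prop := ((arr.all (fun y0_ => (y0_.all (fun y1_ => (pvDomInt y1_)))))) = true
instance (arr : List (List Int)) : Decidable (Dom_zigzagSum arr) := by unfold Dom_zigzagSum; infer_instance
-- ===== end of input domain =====

-- B replaces A's zigzag row/col/direction state machine by two plain nested index loops
-- over rows and the first num_cols columns (simpler; visit order does not affect the sum).


-- ===== PORT A =====
-- the body of A's for-loop: one zigzag move (the loop variable is unused in Python too)
def zzStep (arr : List (List Int)) (numCols : Int) (st : Int × Int × Int) : Int × Int × Int :=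
  let row := st.1
  let col := st.2.1
  let s := st.2.2 + PySem.List.pyGetD (PySem.List.pyGetD arr row []) col 0
  if PySem.Int.mod row 2 == 0 then
    if col == numCols - 1 then (row + 1, col, s) else (row, col + 1, s)
  else
    if col == 0 then (row + 1, col, s) else (row, col - 1, s)

def zigzagSum (arr : List (List Int)) : Int :=
  let numRows : Int := arr.length
  let numCols : Int := (PySem.List.pyGetD arr 0 []).length
  let st := (PySem.List.pyRange 0 (numRows * numCols) 1).foldl
    (fun st _ => zzStep arr numCols st) (0, 0, 0)
  st.2.2

-- ===== PORT B =====
def zigzagSum_alt (arr : List (List Int)) : Int :=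
  let numRows : Int := arr.length
  let numCols : Int := (PySem.List.pyGetD arr 0 []).length
  (PySem.List.pyRange 0 numRows 1).foldl
    (fun tot r =>
      (PySem.List.pyRange 0 numCols 1).foldl
        (fun tot c => tot + PySem.List.pyGetD (PySem.List.pyGetD arr r []) c 0) tot)
    0

-- ===== PRECONDITION & SPEC =====
-- Pre_ excludes exactly the inputs where A raises IndexError: the empty list (len(arr[0]))
-- and arrays with a row shorter than len(arr[0]); B raises there too.
def Pre_zigzagSum (arr : List (List Int)) : Prop :=
  arr ≠ [] ∧ ∀ row ∈ arr, (PySem.List.pyGetD arr 0 []).length ≤ row.length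
instance (arr : List (List Int)) : Decidable (Pre_zigzagSum arr) := by
  unfold Pre_zigzagSum; infer_instance

def pvWitness_zigzagSum : List (List Int) := [[1, 2, 3], [4, 5, 6]]

def Spec_zigzagSum (arr : List (List Int)) (out : Int) : Prop := out = zigzagSum_alt arr
instance (arr : List (List Int)) (out : Int) : Decidable (Spec_zigzagSum arr out) := by
  unfold Spec_zigzagSum; infer_instance

-- ===== CLAIM (what is proved, stated in full; the proofs are below) =====
def Claim_equal_zigzagSum : Prop :=
  ∀ (arr : List (List Int)), Dom_zigzagSum arr → Pre_zigzagSum arr →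
    Spec_zigzagSum arr (zigzagSum arr)

-- ===== LEMMAS AND PROOFS =====

-- a fold whose body ignores the element is an iterate
theorem foldl_const_iterate {α β : Type} (f : β → β) (l : List α) (b : β) :
    l.foldl (fun st _ => f st) b = f^[l.length] b := by
  induction l generalizing b with
  | nil => rfl
  | cons x xs ih => simp [List.foldl_cons, ih, Function.iterate_succ_apply]

theorem mod_two_natCast (r : Nat) : PySem.Int.mod (r : Int) 2 = ((r % 2 : Nat) : Int) := by
  exact_mod_cast PySem.Int.mod_natCast r 2

theorem even_row_walk (arr : List (List Int)) (C : Nat) (r : Nat)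
    (hr : r % 2 = 0) (hlen : C ≤ (arr.getD r []).length) :
    ∀ k, k < C → ∀ s : Int,
      (zzStep arr C)^[k] ((r : Int), 0, s) =
        ((r : Int), (k : Int), s + (((arr.getD r []).take k).sum)) := by
  intro k
  induction k with
  | zero => intro _ s; simp
  | succ k ih =>
    intro hk s
    rw [Function.iterate_succ_apply', ih (by omega) s]
    have hkl : k < (arr.getD r []).length := by omega
    simp only [zzStep, mod_two_natCast, hr]
    have hne : ((k : Int) == (C : Int) - 1) = false := by
      simp; omega
    have hkl' : k < (arr[r]?.getD []).length := hkl
    simp [hne, List.take_add_one, List.getD_eq_getElem?_getD]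
    rw [List.getElem?_eq_getElem hkl']
    simp
    ring

theorem even_row_full (arr : List (List Int)) (C : Nat) (r : Nat)
    (hC : 0 < C) (hr : r % 2 = 0) (hlen : C ≤ (arr.getD r []).length) (s : Int) :
    (zzStep arr C)^[C] ((r : Int), 0, s) =
      ((r : Int) + 1, (C : Int) - 1, s + (((arr.getD r []).take C).sum)) := by
  obtain ⟨C', rfl⟩ : ∃ C', C = C' + 1 := ⟨C - 1, by omega⟩
  rw [Function.iterate_succ_apply',
    even_row_walk arr (C' + 1) r hr hlen C' (by omega) s]
  have hkl' : C' < (arr[r]?.getD []).length := by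
    have : C' < (arr.getD r []).length := by omega
    exact this
  have heq : ((C' : Int) == ((C' + 1 : Nat) : Int) - 1) = true := by push_cast; simp
  simp only [zzStep, mod_two_natCast, hr]
  simp [List.take_add_one, List.getD_eq_getElem?_getD]
  rw [List.getElem?_eq_getElem hkl']
  simp
  ring

theorem odd_row_walk (arr : List (List Int)) (C : Nat) (r : Nat)
    (hr : r % 2 = 1) (hlen : C ≤ (arr.getD r []).length) :
    ∀ k, k < C → ∀ s : Int,
      (zzStep arr C)^[k] ((r : Int), (C : Int) - 1, s) =
        ((r : Int), (C : Int) - 1 - (k : Int),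
          s + ((((arr.getD r []).take C).drop (C - k)).sum)) := by
  intro k
  induction k with
  | zero => intro _ s; simp
  | succ k ih =>
    intro hk s
    rw [Function.iterate_succ_apply', ih (by omega) s]
    have hlen' : C ≤ (arr[r]?.getD []).length := hlen
    have hidx : (0 : Int) ≤ (C : Int) - 1 - (k : Int) := by omega
    have hidx2 : (C : Int) - 1 - (k : Int) < ((arr.getD r []).length : Int) := by
      omega
    have hne : (((C : Int) - 1 - (k : Int)) == 0) = false := by simp; omega
    have hodd : (((r % 2 : Nat) : Int) == 0) = false := by rw [hr]; simp
    have hlt : C - 1 - k < ((arr.getD r []).take C).length := by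
      simp [List.length_take]; omega
    have htn : ((C : Int) - 1 - (k : Int)).toNat = C - 1 - k := by omega
    simp only [zzStep, mod_two_natCast, hodd, PySem.List.pyGetD_natCast]
    rw [PySem.List.pyGetD_eq_getElem _ 0 hidx hidx2]
    rw [show C - (k + 1) = C - 1 - k from by omega,
        List.drop_eq_getElem_cons hlt,
        show C - 1 - k + 1 = C - k from by omega]
    simp [hne, htn, List.getElem_take]
    constructor
    · ring
    · ring

theorem odd_row_full (arr : List (List Int)) (C : Nat) (r : Nat)
    (hC : 0 < C) (hr : r % 2 = 1) (hlen : C ≤ (arr.getD r []).length) (s : Int) :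
    (zzStep arr C)^[C] ((r : Int), (C : Int) - 1, s) =
      ((r : Int) + 1, 0, s + (((arr.getD r []).take C).sum)) := by
  obtain ⟨C', rfl⟩ : ∃ C', C = C' + 1 := ⟨C - 1, by omega⟩
  rw [Function.iterate_succ_apply',
    odd_row_walk arr (C' + 1) r hr hlen C' (by omega) s]
  have hlen' : C' + 1 ≤ (arr[r]?.getD []).length := hlen
  have hcol : (((C' + 1 : Nat) : Int)) - 1 - (C' : Int) = 0 := by push_cast; ring
  have hodd : (((r % 2 : Nat) : Int) == 0) = false := by rw [hr]; simp
  rw [hcol]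
  simp only [zzStep, mod_two_natCast, hodd, PySem.List.pyGetD_natCast]
  have hlt : 0 < ((arr.getD r []).take (C' + 1)).length := by
    simp [List.length_take]; omega
  rw [show C' + 1 - C' = 0 + 1 from by omega,
      show ((arr.getD r []).take (C' + 1)).sum =
        (((arr.getD r []).take (C' + 1)).drop 0).sum from by rw [List.drop_zero],
      List.drop_eq_getElem_cons hlt]
  rw [PySem.List.pyGetD_eq_getElem _ 0 le_rfl (by exact_mod_cast Nat.lt_of_lt_of_le hC hlen')]
  simp [List.getElem_take]
  ring

theorem zig_main (arr : List (List Int)) (C : Nat) (hC : 0 < C)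
    (hlen : ∀ row ∈ arr, C ≤ row.length) :
    ∀ r, r ≤ arr.length →
      (zzStep arr C)^[r * C] (0, 0, 0) =
        ((r : Int), (if r % 2 = 0 then (0 : Int) else (C : Int) - 1),
          ((List.range r).map (fun i => (((arr.getD i []).take C).sum))).sum) := by
  intro r
  induction r with
  | zero => intro _; simp
  | succ r ih =>
    intro hR
    have hrlt : r < arr.length := by omega
    have hrow : C ≤ (arr.getD r []).length := by
      refine hlen _ ?_
      rw [List.getD_eq_getElem?_getD, List.getElem?_eq_getElem hrlt]
      simp
    rw [show (r + 1) * C = C + r * C from by ring, Function.iterate_add_apply,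
      ih (by omega)]
    rcases Nat.mod_two_eq_zero_or_one r with h | h
    · have h1 : (r + 1) % 2 = 1 := by omega
      rw [h]
      norm_num
      rw [even_row_full arr C r hC h hrow]
      simp [h1, List.range_succ]
    · have h1 : (r + 1) % 2 = 0 := by omega
      rw [h]
      norm_num
      rw [odd_row_full arr C r hC h hrow]
      simp [h1, List.range_succ]

theorem alt_inner (arr : List (List Int)) (r : Int) :
    ∀ (C : Nat) (tot : Int), C ≤ (PySem.List.pyGetD arr r []).length →
      (PySem.List.pyRange 0 (C : Int) 1).foldl
        (fun tot c => tot + PySem.List.pyGetD (PySem.List.pyGetD arr r []) c 0) tot =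
      tot + ((PySem.List.pyGetD arr r []).take C).sum := by
  intro C
  induction C with
  | zero => intro tot _; simp [PySem.List.pyRange_one_eq_nil]
  | succ C ih =>
    intro tot h
    rw [show ((C + 1 : Nat) : Int) = (C : Int) + 1 from by push_cast; ring,
      PySem.List.pyRange_one_succ_right (by positivity), List.foldl_append,
      ih tot (by omega)]
    have hlt : C < (PySem.List.pyGetD arr r []).length := by omega
    simp [List.foldl_cons, List.take_add_one, List.getD_eq_getElem?_getD]
    rw [List.getElem?_eq_getElem hlt]
    simp
    ring

theorem alt_sum (arr : List (List Int)) (C : Nat)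
    (hlen : ∀ row ∈ arr, C ≤ row.length) :
    ∀ (R : Nat) (tot : Int), R ≤ arr.length →
      (PySem.List.pyRange 0 (R : Int) 1).foldl
        (fun tot r =>
          (PySem.List.pyRange 0 (C : Int) 1).foldl
            (fun tot c => tot + PySem.List.pyGetD (PySem.List.pyGetD arr r []) c 0) tot) tot =
      tot + ((List.range R).map (fun i => (((arr.getD i []).take C).sum))).sum := by
  intro R
  induction R with
  | zero => intro tot _; simp [PySem.List.pyRange_one_eq_nil]
  | succ R ih =>
    intro tot hR
    have hRlt : R < arr.length := by omega
    have hrow : C ≤ (PySem.List.pyGetD arr (R : Int) []).length := by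
      rw [PySem.List.pyGetD_natCast]
      refine hlen _ ?_
      rw [List.getD_eq_getElem?_getD, List.getElem?_eq_getElem hRlt]
      simp
    rw [show ((R + 1 : Nat) : Int) = (R : Int) + 1 from by push_cast; ring,
      PySem.List.pyRange_one_succ_right (by positivity), List.foldl_append,
      ih tot (by omega)]
    simp only [List.foldl_cons, List.foldl_nil]
    rw [alt_inner arr (R : Int) C _ hrow]
    simp [List.range_succ, PySem.List.pyGetD_natCast]
    ring

theorem final (arr : List (List Int)) (hlen : ∀ row ∈ arr, (PySem.List.pyGetD arr 0 []).length ≤ row.length) :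
    zigzagSum arr = zigzagSum_alt arr := by
  set C : Nat := (PySem.List.pyGetD arr 0 []).length with hCdef
  have hB : zigzagSum_alt arr =
      ((List.range arr.length).map (fun i => (((arr.getD i []).take C).sum))).sum := by
    unfold zigzagSum_alt
    rw [alt_sum arr C hlen arr.length 0 le_rfl]
    simp
  by_cases hC0 : C = 0
  · unfold zigzagSum
    rw [hB]
    simp [← hCdef, hC0, PySem.List.pyRange_one_eq_nil]
  · rw [hB]
    unfold zigzagSum
    simp only [← hCdef]
    rw [foldl_const_iterate]
    have hlen2 : (PySem.List.pyRange 0 ((arr.length : Int) * (C : Int)) 1).length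
        = arr.length * C := by
      rw [PySem.List.length_pyRange_one]
      omega
    rw [hlen2, zig_main arr C (by omega) hlen arr.length le_rfl]


-- ===== VERDICT (by name: the statement is the Claim_ definition above) =====
theorem zigzagSum_spec : Claim_equal_zigzagSum := by
  intro arr _ hpre
  unfold Spec_zigzagSum
  exact final arr hpre.2
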